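-- pv_equiv track=rewrite | github.com/Rainily/COMP472_Project_1 | IndonesianDotPuzzle.py | indexToLetterNumber
-- ===== SOURCE A (Python) =====
-- def indexToLetterNumber(index, dimension):
-- 	row = 1
-- 	collumn = 1
--
-- 	# find out which row the index is in
-- 	while index > row * dimension:
-- 		row += 1
--
-- 	# find out which collumn the index is in
-- 	while index > (row - 1) * dimension + collumn:
-- 		collumn += 1
--
-- 	rowLetter = {1:'A', 2:'B', 3:'C', 4:'D', 5:'E', 6:'F', 7:'G', 8:'H', 9:'I', 10:'J' }
--
-- 	return rowLetter.get(row, "Invalid row!") + str(collumn)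
-- ===== SOURCE B (Python) =====
-- def indexToLetterNumber(index, dimension):
--     # O(1): row = ceiling(index/dimension) clamped to >= 1, column by subtraction
--     row = max(1, -(-index // dimension))
--     col = max(1, index - (row - 1) * dimension)
--     if 1 <= row <= 10:
--         return "ABCDEFGHIJ"[row - 1] + str(col)
--     return "Invalid row!" + str(col)
-- ===== Notes on version B (the rewrite author's own statement) =====
-- stated objective: faster
-- what changed: Replaces the two counting while-loops (O(index) increments) by closed-form ceiling division and subtraction, and the row dict by direct string indexing.
-- outside the precondition, e.g. on indexToLetterNumber(-5, -3): A returns 'A1', B returns 'B1'; on indexToLetterNumber(0, 0): A returns 'A1', B raises ZeroDivisionError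
import Mathlib
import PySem

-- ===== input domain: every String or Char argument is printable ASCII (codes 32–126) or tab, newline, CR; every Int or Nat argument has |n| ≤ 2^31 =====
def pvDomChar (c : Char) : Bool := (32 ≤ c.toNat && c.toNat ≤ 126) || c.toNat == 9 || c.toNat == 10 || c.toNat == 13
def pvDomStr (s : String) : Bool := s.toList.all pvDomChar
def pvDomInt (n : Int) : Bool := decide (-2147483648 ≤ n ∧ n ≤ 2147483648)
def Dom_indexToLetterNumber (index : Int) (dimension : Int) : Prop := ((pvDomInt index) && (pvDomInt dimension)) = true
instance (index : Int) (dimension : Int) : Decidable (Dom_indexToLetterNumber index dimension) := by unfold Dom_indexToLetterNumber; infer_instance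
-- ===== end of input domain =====

-- B replaces A's two counting while-loops by closed-form ceiling division (O(1) instead of O(index)).

-- ===== PORT A =====
-- the 'while index > row * dimension: row += 1' loop; fuel only makes it total,
-- with Pre_ (0 < dimension) the fuel used at the call site is never exhausted
def pvRowLoop (index dimension : Int) (row : Int) : Nat → Int
  | 0 => row
  | f + 1 => if index > row * dimension then pvRowLoop index dimension (row + 1) f else row

-- the 'while index > (row - 1) * dimension + collumn: collumn += 1' loop
def pvColLoop (index dimension row : Int) (col : Int) : Nat → Int
  | 0 => col
  | f + 1 => if index > (row - 1) * dimension + col then pvColLoop index dimension row (col + 1) f else col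

def pvRowLetter : PySem.Dict Int String :=
  PySem.Dict.ofList [(1, "A"), (2, "B"), (3, "C"), (4, "D"), (5, "E"),
                     (6, "F"), (7, "G"), (8, "H"), (9, "I"), (10, "J")]

def indexToLetterNumber (index : Int) (dimension : Int) : String :=
  let row := pvRowLoop index dimension 1 index.toNat
  let col := pvColLoop index dimension row 1 index.toNat
  (pvRowLetter.getD row "Invalid row!") ++ PySem.Int.toStr col

-- ===== PORT B =====
def indexToLetterNumber_alt (index : Int) (dimension : Int) : String :=
  let row := max 1 (-(PySem.Int.floordiv (-index) dimension))
  let col := max 1 (index - (row - 1) * dimension)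
  if 1 ≤ row ∧ row ≤ 10 then
    (((PySem.Str.pyGet? "ABCDEFGHIJ" (row - 1)).map String.singleton).getD "") ++ PySem.Int.toStr col
  else
    "Invalid row!" ++ PySem.Int.toStr col

-- ===== PRECONDITION & SPEC =====
-- Pre_ excludes dimension ≤ 0: there A's first while-loop diverges whenever index > dimension,
-- and where it does stop (index ≤ dimension ≤ 0, or index ≤ 0 = dimension) the returned "A1" is an
-- accident of the loop's start state; B divides by dimension, which only makes sense for a positive grid size.
def Pre_indexToLetterNumber (index : Int) (dimension : Int) : Prop := 0 < dimension
instance (index : Int) (dimension : Int) : Decidable (Pre_indexToLetterNumber index dimension) := by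
  unfold Pre_indexToLetterNumber; infer_instance

def pvWitness_indexToLetterNumber : Int × Int := (5, 3)

def Spec_indexToLetterNumber (index : Int) (dimension : Int) (out : String) : Prop := out = indexToLetterNumber_alt index dimension
instance (index : Int) (dimension : Int) (out : String) : Decidable (Spec_indexToLetterNumber index dimension out) := by unfold Spec_indexToLetterNumber; infer_instance

-- ===== CLAIM (what is proved, stated in full; the proofs are below) =====
def Claim_equal_indexToLetterNumber : Prop := ∀ (index : Int) (dimension : Int), Dom_indexToLetterNumber index dimension → Pre_indexToLetterNumber index dimension → Spec_indexToLetterNumber index dimension (indexToLetterNumber index dimension)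

-- ===== LEMMAS AND PROOFS =====

-- A's row loop reaches the least row ≥ start with index ≤ row*dimension, i.e. max start C
-- where C is the ceiling of index/dimension, provided the fuel suffices.
lemma pvRowLoop_eq (index dim : Int) (hd : 0 < dim) (C : Int)
    (h1 : (C - 1) * dim < index) (h2 : index ≤ C * dim) :
    ∀ (fuel : Nat) (row : Int), C ≤ row + fuel →
      pvRowLoop index dim row fuel = max row C := by
  intro fuel
  induction fuel with
  | zero => intro row h; simp only [pvRowLoop]; omega
  | succ f ih =>
    intro row h
    simp only [pvRowLoop]
    split_ifs with hc
    · have hrow : row < C := by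
        by_contra hge
        push_neg at hge
        have : C * dim ≤ row * dim := mul_le_mul_of_nonneg_right hge (le_of_lt hd)
        omega
      rw [ih (row + 1) (by omega)]
      omega
    · push_neg at hc
      have : (C - 1) * dim < row * dim := lt_of_lt_of_le h1 hc
      have hCle : C - 1 < row := lt_of_mul_lt_mul_right this (le_of_lt hd)
      omega

-- A's column loop reaches the least col ≥ start with col ≥ index - (row-1)*dimension.
lemma pvColLoop_eq (index dim row K : Int) (hK : (row - 1) * dim = K) :
    ∀ (fuel : Nat) (col : Int), index - K ≤ col + fuel →
      pvColLoop index dim row col fuel = max col (index - K) := by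
  intro fuel
  induction fuel with
  | zero => intro col h; simp only [pvColLoop]; omega
  | succ f ih =>
    intro col h
    simp only [pvColLoop, hK]
    split_ifs with hc
    · rw [ih (col + 1) (by omega)]; omega
    · omega

-- ceiling-division bracket for C = -((-index) // dimension)
lemma pvCeil_facts (index dim : Int) (hd : 0 < dim) :
    (-(PySem.Int.floordiv (-index) dim) - 1) * dim < index ∧
      index ≤ -(PySem.Int.floordiv (-index) dim) * dim :=
  (PySem.Int.neg_floordiv_neg_eq_iff_of_pos hd).mp rfl

-- ===== VERDICT (by name: the statement is the Claim_ definition above) =====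
theorem indexToLetterNumber_spec : Claim_equal_indexToLetterNumber := by
  intro index dim hDom hPre
  have hd : 0 < dim := hPre
  unfold Spec_indexToLetterNumber indexToLetterNumber indexToLetterNumber_alt
  set C : Int := -(PySem.Int.floordiv (-index) dim) with hC
  obtain ⟨h1, h2⟩ := pvCeil_facts index dim hd
  rw [← hC] at h1 h2
  -- fuel bound for the row loop
  have hCfuel : C ≤ 1 + (index.toNat : Int) := by
    by_cases hCle : C ≤ 1
    · omega
    · have : C - 1 ≤ (C - 1) * dim := le_mul_of_one_le_right (by omega) hd
      omega
  set R : Int := max 1 C with hR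
  have hR1 : 1 ≤ R := le_max_left _ _
  have hKnn : 0 ≤ (R - 1) * dim := mul_nonneg (by omega) (le_of_lt hd)
  have hrow : pvRowLoop index dim 1 index.toNat = R :=
    pvRowLoop_eq index dim hd C h1 h2 index.toNat 1 (by omega)
  have hcol : pvColLoop index dim R 1 index.toNat = max 1 (index - (R - 1) * dim) :=
    pvColLoop_eq index dim R ((R - 1) * dim) rfl index.toNat 1 (by omega)
  simp only [hrow, hcol]
  -- the row letter
  by_cases hrange : 1 ≤ R ∧ R ≤ 10
  · rw [if_pos hrange]
    congr 1
    obtain ⟨hlo, hhi⟩ := hrange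
    interval_cases R <;> decide
  · rw [if_neg hrange]
    congr 1
    have hitems : pvRowLetter.items = [(1, "A"), (2, "B"), (3, "C"), (4, "D"), (5, "E"),
        (6, "F"), (7, "G"), (8, "H"), (9, "I"), (10, "J")] := by rfl
    have e1 : ((1 : Int) == R) = false := by simp; omega
    have e2 : ((2 : Int) == R) = false := by simp; omega
    have e3 : ((3 : Int) == R) = false := by simp; omega
    have e4 : ((4 : Int) == R) = false := by simp; omega
    have e5 : ((5 : Int) == R) = false := by simp; omega
    have e6 : ((6 : Int) == R) = false := by simp; omega
    have e7 : ((7 : Int) == R) = false := by simp; omega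
    have e8 : ((8 : Int) == R) = false := by simp; omega
    have e9 : ((9 : Int) == R) = false := by simp; omega
    have e10 : ((10 : Int) == R) = false := by simp; omega
    simp [PySem.Dict.getD, PySem.Dict.get?, hitems, List.find?,
          e1, e2, e3, e4, e5, e6, e7, e8, e9, e10]
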